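-- pv_equiv track=rewrite | github.com/454335025/leetcode | 599.py | l599
-- ===== SOURCE A (Python) =====
-- def l599(list1,list2):
--     list3 = set(list1)& set(list2)
--     b = []
--     a = len(list1+list2)
--     for v in list3:
--         if a>list1.index(v)+list2.index(v):
--             a = list1.index(v)+list2.index(v)
--             b = []
--             b.append(v)
--         elif a==list1.index(v)+list2.index(v):
--             b.append(v)
--
--
--     return b
-- ===== SOURCE B (Python) =====
-- def l599(list1, list2):
--     # Bucket every common value by its index-sum (counting-sort style), then
--     # scan the possible sums upward and return the first non-empty bucket:
--     # no running minimum is tracked anywhere.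
--     pos1 = {}
--     for i, v in enumerate(list1):
--         if v not in pos1:
--             pos1[v] = i
--     pos2 = {}
--     for j, v in enumerate(list2):
--         if v not in pos2:
--             pos2[v] = j
--     buckets = {}
--     for v, i in pos1.items():
--         j = pos2.get(v)
--         if j is not None:
--             buckets.setdefault(i + j, []).append(v)
--     for s in range(len(list1) + len(list2) - 1):
--         if s in buckets:
--             return buckets[s]
--     return []
-- ===== Notes on version B (the rewrite author's own statement) =====
-- stated objective: faster
-- what changed: A repeatedly rescans both lists with list.index while tracking a running minimum with reset branches; B never tracks a minimum: it buckets every common value by its index-sum (counting-sort style, over first-index dicts built in one pass each) and returns the first non-empty bucket while scanning the possible sums upward. Pre_ excludes inputs where two distinct common values tie for the minimal index-sum: there A's result order is the nondeterministic hash-iteration order of set(list1) & set(list2), so no literal cite can state it.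
import Mathlib
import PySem

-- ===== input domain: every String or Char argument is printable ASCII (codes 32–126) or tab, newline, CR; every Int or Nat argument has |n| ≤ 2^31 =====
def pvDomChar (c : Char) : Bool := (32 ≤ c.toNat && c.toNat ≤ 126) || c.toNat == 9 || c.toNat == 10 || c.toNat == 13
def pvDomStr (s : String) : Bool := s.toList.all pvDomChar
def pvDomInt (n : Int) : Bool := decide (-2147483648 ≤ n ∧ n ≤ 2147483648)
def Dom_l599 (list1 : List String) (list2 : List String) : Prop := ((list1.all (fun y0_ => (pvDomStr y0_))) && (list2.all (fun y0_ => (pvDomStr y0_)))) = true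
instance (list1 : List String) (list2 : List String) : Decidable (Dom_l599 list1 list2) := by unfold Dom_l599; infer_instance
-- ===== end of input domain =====

-- B buckets the common values by index-sum and returns the first non-empty bucket while scanning the sums upward (no running minimum, asymptotically faster); equivalence proved outside min-sum ties, where Python A's set-iteration order is hash-dependent.


-- ===== PORT A =====
-- every v in list3 is a member of both lists, so list.index cannot raise: `.getD 0` is exact here
def l599 (list1 : List String) (list2 : List String) : List String :=
  let list3 : PySem.Set String := PySem.Set.inter (PySem.Set.ofList list1) (PySem.Set.ofList list2)
  (list3.foldl (fun (st : Int × List String) v =>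
    let s : Int := (((PySem.List.index? list1 v).getD 0 : Nat) : Int)
                 + (((PySem.List.index? list2 v).getD 0 : Nat) : Int)
    if st.1 > s then (s, [v])
    else if st.1 = s then (st.1, st.2 ++ [v])
    else st) (PySem.List.len (list1 ++ list2), [])).2

-- ===== PORT B =====
-- the first-index dictionary: `for i, v in enumerate(l): if v not in pos: pos[v] = i`
def l599FirstPos (l : List String) : PySem.Dict String Int :=
  (PySem.List.enumerate l 0).foldl
    (fun d p => if d.contains p.2 then d else d.insert p.2 p.1) PySem.Dict.empty

-- `for s in range(...): if s in buckets: return buckets[s]`; `buckets[s]` under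
-- the membership guard is exact as `.getD s []`
def l599Scan (bk : PySem.Dict Int (List String)) : List Int → List String
  | [] => []
  | s :: rest => if bk.contains s then bk.getD s [] else l599Scan bk rest

-- `j = pos2.get(v); if j is not None: buckets.setdefault(i + j, []).append(v)`
-- is the match on `get?` plus `modify (i + j) [] (· ++ [v])`
def l599_alt (list1 : List String) (list2 : List String) : List String :=
  let pos1 := l599FirstPos list1
  let pos2 := l599FirstPos list2
  let buckets := pos1.items.foldl (fun d p =>
    match pos2.get? p.1 with
    | some j => d.modify (p.2 + j) [] (fun l => l ++ [p.1])
    | none => d) PySem.Dict.empty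
  l599Scan buckets (PySem.List.pyRange 0 (PySem.List.len list1 + PySem.List.len list2 - 1) 1)

-- ===== PRECONDITION & SPEC =====
def l599IdxSum (list1 : List String) (list2 : List String) (v : String) : Nat :=
  list1.idxOf v + list2.idxOf v

-- Pre_ excludes exactly the inputs on which two distinct common values share the MINIMAL index-sum:
-- there Python A's result order is the hash-dependent iteration order of `set(list1) & set(list2)`
-- (nondeterministic across runs), a corner nobody would specify; B uses list1's first-occurrence order.
def Pre_l599 (list1 : List String) (list2 : List String) : Prop :=
  ∀ v ∈ (PySem.Set.ofList list1).filter (fun u => decide (u ∈ list2)),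
    ∀ w ∈ (PySem.Set.ofList list1).filter (fun u => decide (u ∈ list2)),
      (∀ u ∈ (PySem.Set.ofList list1).filter (fun u => decide (u ∈ list2)),
        l599IdxSum list1 list2 v ≤ l599IdxSum list1 list2 u) →
      l599IdxSum list1 list2 v = l599IdxSum list1 list2 w → v = w

instance (list1 : List String) (list2 : List String) : Decidable (Pre_l599 list1 list2) := by
  unfold Pre_l599; infer_instance

def pvWitness_l599 : List String × List String := (["a", "b"], ["b", "c", "a"])

def Spec_l599 (list1 : List String) (list2 : List String) (out : List String) : Prop := out = l599_alt list1 list2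
instance (list1 : List String) (list2 : List String) (out : List String) : Decidable (Spec_l599 list1 list2 out) := by unfold Spec_l599; infer_instance

-- ===== CLAIM (what is proved, stated in full; the proofs are below) =====
def Claim_equal_l599 : Prop := ∀ (list1 : List String) (list2 : List String), Dom_l599 list1 list2 → Pre_l599 list1 list2 → Spec_l599 list1 list2 (l599 list1 list2)

-- ===== LEMMAS AND PROOFS =====

-- A's index-sum of a value, and the common-value list / tracked minimum, as proof-side names
def l599F (list1 list2 : List String) (v : String) : Int :=
  (((PySem.List.index? list1 v).getD 0 : Nat) : Int) + (((PySem.List.index? list2 v).getD 0 : Nat) : Int)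

def l599C (list1 list2 : List String) : List String :=
  PySem.Set.inter (PySem.Set.ofList list1) (PySem.Set.ofList list2)

def l599M (list1 list2 : List String) : Int :=
  (l599C list1 list2).foldl (fun x v => min x (l599F list1 list2 v)) (PySem.List.len (list1 ++ list2))

def l599Cand (list1 list2 : List String) : List (Int × String) :=
  (l599FirstPos list1).items.filterMap
    (fun p => ((l599FirstPos list2).get? p.1).map (fun j => (p.2 + j, p.1)))

-- min-fold facts
theorem l599_minfold_le (f : String → Int) (l : List String) (a : Int) :
    l.foldl (fun x v => min x (f v)) a ≤ a := by
  induction l generalizing a with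
  | nil => simp
  | cons x xs ih => exact le_trans (ih (min a (f x))) (min_le_left _ _)

theorem l599_minfold_le_mem (f : String → Int) (l : List String) (a : Int) (v : String)
    (hv : v ∈ l) : l.foldl (fun x v => min x (f v)) a ≤ f v := by
  induction l generalizing a with
  | nil => cases hv
  | cons x xs ih =>
    simp only [List.foldl_cons]
    rcases List.mem_cons.mp hv with h | h
    · subst h; exact le_trans (l599_minfold_le f xs _) (min_le_right _ _)
    · exact ih _ h

theorem l599_minfold_cases (f : String → Int) (l : List String) (a : Int) :
    l.foldl (fun x v => min x (f v)) a = a ∨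
      ∃ v ∈ l, l.foldl (fun x v => min x (f v)) a = f v := by
  induction l generalizing a with
  | nil => left; rfl
  | cons x xs ih =>
    simp only [List.foldl_cons]
    rcases ih (min a (f x)) with h | ⟨v, hv, h⟩
    · rcases min_choice a (f x) with hm | hm
      · left; rw [h, hm]
      · right; exact ⟨x, by simp, by rw [h, hm]⟩
    · right; exact ⟨v, List.mem_cons_of_mem _ hv, h⟩

-- A's minimum-tracking loop, characterised
theorem l599_fold_minTrack (f : String → Int) (l : List String) (a : Int) (b : List String) :
    l.foldl (fun st v =>
        if st.1 > f v then (f v, [v])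
        else if st.1 = f v then (st.1, st.2 ++ [v])
        else st) (a, b)
      = (l.foldl (fun x v => min x (f v)) a,
         (if l.foldl (fun x v => min x (f v)) a = a then b else [])
           ++ l.filter (fun v => f v == l.foldl (fun x v => min x (f v)) a)) := by
  induction l generalizing a b with
  | nil => simp
  | cons x xs ih =>
    simp only [List.foldl_cons]
    by_cases h1 : a > f x
    · have hmin : min a (f x) = f x := min_eq_right h1.le
      rw [if_pos h1, ih]
      simp only [hmin]
      have hle := l599_minfold_le f xs (f x)
      have hne : xs.foldl (fun x v => min x (f v)) (f x) ≠ a :=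
        ne_of_lt (lt_of_le_of_lt hle h1)
      rw [if_neg hne, List.filter_cons]
      refine congrArg (Prod.mk _) ?_
      by_cases h2 : xs.foldl (fun x v => min x (f v)) (f x) = f x
      · have hb : (f x == xs.foldl (fun x v => min x (f v)) (f x)) = true := by simp [h2]
        rw [if_pos h2, hb]
        simp
      · have hb : (f x == xs.foldl (fun x v => min x (f v)) (f x)) = false := by
          simp only [beq_eq_false_iff_ne]
          exact fun h => h2 h.symm
        rw [if_neg h2, hb]
        simp
    · rw [if_neg h1]
      by_cases h2 : a = f x
      · have hmin : min a (f x) = a := min_eq_left (le_of_eq h2)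
        rw [if_pos h2, ih]
        simp only [hmin]
        rw [List.filter_cons]
        refine congrArg (Prod.mk _) ?_
        by_cases h3 : xs.foldl (fun x v => min x (f v)) a = a
        · have hb : (f x == xs.foldl (fun x v => min x (f v)) a) = true := by
            simp [h3, ← h2]
          rw [if_pos h3, if_pos h3, hb]
          simp
        · have hb : (f x == xs.foldl (fun x v => min x (f v)) a) = false := by
            simp only [beq_eq_false_iff_ne]
            intro h
            exact h3 (by rw [← h, ← h2])
          rw [if_neg h3, if_neg h3, hb]
          simp
      · have hlt : a < f x := lt_of_le_of_ne (not_lt.mp h1) h2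
        have hmin : min a (f x) = a := min_eq_left hlt.le
        rw [if_neg h2, ih]
        simp only [hmin]
        rw [List.filter_cons]
        refine congrArg (Prod.mk _) ?_
        have hle := l599_minfold_le f xs a
        have hb : (f x == xs.foldl (fun x v => min x (f v)) a) = false := by
          simp only [beq_eq_false_iff_ne]
          intro h
          exact absurd (h ▸ hle) (not_le.mpr hlt)
        rw [hb]
        simp

theorem l599_A_eq (list1 list2 : List String) :
    l599 list1 list2
      = (l599C list1 list2).filter (fun v => l599F list1 list2 v == l599M list1 list2) := by
  have e : l599 list1 list2
      = ((l599C list1 list2).foldl (fun (st : Int × List String) v =>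
          if st.1 > l599F list1 list2 v then (l599F list1 list2 v, [v])
          else if st.1 = l599F list1 list2 v then (st.1, st.2 ++ [v])
          else st) (PySem.List.len (list1 ++ list2), [])).2 := rfl
  rw [e, l599_fold_minTrack]
  show (if _ = _ then ([] : List String) else []) ++ _ = _
  rw [ite_self]
  rfl

-- the first-index dict build, generalized over the start index and the accumulated dict
theorem l599FirstPos_get?_aux (l : List String) (s : Int) (d : PySem.Dict String Int) (v : String) :
    ((PySem.List.enumerate l s).foldl
      (fun d p => if d.contains p.2 then d else d.insert p.2 p.1) d).get? v
    = if d.contains v then d.get? v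
      else (PySem.List.index? l v).map (fun n => s + (n : Int)) := by
  induction l generalizing s d with
  | nil =>
      simp only [PySem.List.enumerate_nil, List.foldl_nil]
      rcases h : d.contains v with _ | _
      · rw [(PySem.Dict.get?_eq_none_iff_contains d v).mpr h,
          (PySem.List.index?_eq_none_iff ([] : List String) v).mpr (by simp)]
        simp
      · simp only [if_true]
  | cons x xs ih =>
      simp only [PySem.List.enumerate_cons, List.foldl_cons]
      rcases hx : d.contains x with _ | _
      · simp only [if_false, Bool.false_eq_true]
        rw [ih]
        by_cases hv : v = x
        · subst hv
          rw [PySem.List.index?_cons_self]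
          simp [PySem.Dict.contains_insert_self, PySem.Dict.get?_insert_self, hx]
        · have hc : (d.insert x s).contains v = d.contains v := by
            simp [PySem.Dict.contains_insert, hv]
          rw [hc, PySem.Dict.get?_insert_of_ne _ _ hv]
          rcases hdv : d.contains v with _ | _
          · simp only [if_false, Bool.false_eq_true]
            rw [PySem.List.index?_cons_of_ne _ (fun h => hv h.symm)]
            cases PySem.List.index? xs v
            · simp
            · simp; ring
          · simp
      · simp only [if_true]
        rw [ih]
        rcases hdv : d.contains v with _ | _
        · have hv : v ≠ x := fun h => by rw [h, hx] at hdv; cases hdv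
          simp only [if_false, Bool.false_eq_true]
          rw [PySem.List.index?_cons_of_ne _ (fun h => hv h.symm)]
          cases PySem.List.index? xs v
          · simp
          · simp; ring
        · simp

theorem l599FirstPos_get? (l : List String) (v : String) :
    (l599FirstPos l).get? v = (PySem.List.index? l v).map (fun n => (n : Int)) := by
  rw [l599FirstPos, l599FirstPos_get?_aux]
  simp [PySem.Dict.contains_empty]

theorem l599FirstPos_keys_aux (l : List String) (s : Int) (d : PySem.Dict String Int) :
    ((PySem.List.enumerate l s).foldl
      (fun d p => if d.contains p.2 then d else d.insert p.2 p.1) d).keys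
    = PySem.Set.update d.keys l := by
  induction l generalizing s d with
  | nil => simp [PySem.List.enumerate_nil, PySem.Set.update_nil]
  | cons x xs ih =>
      simp only [PySem.List.enumerate_cons, List.foldl_cons]
      rw [PySem.Set.update_cons]
      rcases hx : d.contains x with _ | _
      · simp only [if_false, Bool.false_eq_true]
        rw [ih, PySem.Dict.keys_insert_of_not_contains _ _ hx,
          PySem.Set.add_of_not_mem (by
            intro hmem
            rw [(PySem.Dict.contains_iff_mem_keys d x).mpr hmem] at hx; cases hx)]
      · simp only [if_true]
        rw [ih, PySem.Set.add_of_mem ((PySem.Dict.contains_iff_mem_keys d x).mp hx)]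

theorem l599FirstPos_keys (l : List String) :
    (l599FirstPos l).keys = PySem.Set.ofList l := by
  rw [l599FirstPos, l599FirstPos_keys_aux]
  simp [PySem.Dict.keys_empty, PySem.Set.update_nil_left]

-- the bucket-building loop with its None-guard is the plain modify-loop over the candidate pairs
theorem l599_buckets_match (pos2 : PySem.Dict String Int) (items : List (String × Int))
    (d : PySem.Dict Int (List String)) :
    items.foldl (fun d p =>
        match pos2.get? p.1 with
        | some j => d.modify (p.2 + j) [] (fun l => l ++ [p.1])
        | none => d) d
      = (items.filterMap (fun p => (pos2.get? p.1).map (fun j => (p.2 + j, p.1)))).foldl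
          (fun d q => d.modify q.1 [] (fun l => l ++ [q.2])) d := by
  induction items generalizing d with
  | nil => rfl
  | cons p ps ih =>
    rcases h : pos2.get? p.1 with _ | j <;>
      simp [List.foldl_cons, h, ih]

theorem l599_filterMap_guard {α β : Type} (l : List α) (p : α → Bool) (g : α → β)
    (F : α → Option β) (hF : ∀ v ∈ l, F v = if p v then some (g v) else none) :
    l.filterMap F = (l.filter p).map g := by
  induction l with
  | nil => rfl
  | cons x xs ih =>
    rw [List.filterMap_cons, hF x (by simp), List.filter_cons]
    rcases h : p x with _ | _ <;>
      simp [ih (fun v hv => hF v (by simp [hv]))]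

theorem l599C_mem (list1 list2 : List String) (v : String) :
    v ∈ l599C list1 list2 ↔ v ∈ list1 ∧ v ∈ list2 := by
  unfold l599C
  rw [PySem.Set.mem_inter, PySem.Set.mem_ofList, PySem.Set.mem_ofList]

theorem l599_cand_eq (list1 list2 : List String) :
    l599Cand list1 list2 = (l599C list1 list2).map (fun v => (l599F list1 list2 v, v)) := by
  unfold l599Cand
  rw [PySem.Dict.items_eq_map_keys _ (by
        rw [l599FirstPos_keys]; exact PySem.Set.nodup_ofList _) (0 : Int),
    l599FirstPos_keys, List.filterMap_map,
    l599_filterMap_guard (PySem.Set.ofList list1) (fun v => decide (v ∈ list2))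
      (fun v => (l599F list1 list2 v, v)) _ ?_]
  · have : (PySem.Set.ofList list1).filter (fun v => decide (v ∈ list2)) = l599C list1 list2 := by
      unfold l599C PySem.Set.inter
      exact List.filter_congr (fun x _ => by
        rw [PySem.Set.contains_eq_listContains]
        simp [PySem.Set.mem_ofList])
    rw [this]
  · intro v hv
    have hv1 : v ∈ list1 := (PySem.Set.mem_ofList _ _).mp hv
    obtain ⟨i1, hi1⟩ := Option.isSome_iff_exists.mp
      ((PySem.List.index?_isSome_iff list1 v).mpr hv1)
    simp only [Function.comp]
    rw [l599FirstPos_get? list2 v]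
    by_cases hv2 : v ∈ list2
    · obtain ⟨i2, hi2⟩ := Option.isSome_iff_exists.mp
        ((PySem.List.index?_isSome_iff list2 v).mpr hv2)
      have hg1 : (l599FirstPos list1).getD v 0 = (i1 : Int) := by
        rw [PySem.Dict.getD_eq_get?_getD, l599FirstPos_get?, hi1]; rfl
      rw [PySem.List.index?_eq_idxOf?] at hi1 hi2
      simp [hi2, hg1, hv2, l599F, hi1]
    · have hnone := (PySem.List.index?_eq_none_iff list2 v).mpr hv2
      rw [PySem.List.index?_eq_idxOf?] at hnone
      simp [hnone, hv2]

theorem l599_buckets_contains (list1 list2 : List String) (s : Int) :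
    ((l599Cand list1 list2).foldl
        (fun d q => d.modify q.1 [] (fun l => l ++ [q.2])) PySem.Dict.empty).contains s
      = decide (∃ v ∈ l599C list1 list2, l599F list1 list2 v = s) := by
  rw [PySem.Dict.contains_eq_decide_mem_keys,
    PySem.Dict.keys_foldl_modify_key (l599Cand list1 list2) (fun q => q.1) []
      (fun d q => fun l => l ++ [q.2]) PySem.Dict.empty,
    PySem.Dict.keys_empty, PySem.Set.update_nil_left]
  apply decide_eq_decide.mpr
  rw [PySem.Set.mem_ofList, l599_cand_eq, List.map_map]
  simp [eq_comm]

theorem l599_buckets_getD (list1 list2 : List String) (s : Int) :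
    ((l599Cand list1 list2).foldl
        (fun d q => d.modify q.1 [] (fun l => l ++ [q.2])) PySem.Dict.empty).getD s []
      = (l599C list1 list2).filter (fun v => l599F list1 list2 v == s) := by
  rw [PySem.Dict.getD_foldl_modify_append, PySem.Dict.getD_empty, l599_cand_eq,
    List.filter_map, List.map_map]
  have h1 : ((fun (p : Int × String) => p.1 == s) ∘ fun v => (l599F list1 list2 v, v))
      = fun v => l599F list1 list2 v == s := rfl
  have h2 : ((fun (p : Int × String) => p.2) ∘ fun v => (l599F list1 list2 v, v))
      = fun v => v := rfl
  rw [h1, h2]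
  simp

theorem l599_B_eq (list1 list2 : List String) :
    l599_alt list1 list2
      = l599Scan ((l599Cand list1 list2).foldl
          (fun d q => d.modify q.1 [] (fun l => l ++ [q.2])) PySem.Dict.empty)
          (PySem.List.pyRange 0 (PySem.List.len list1 + PySem.List.len list2 - 1) 1) := by
  have e : l599_alt list1 list2
      = l599Scan ((l599FirstPos list1).items.foldl (fun d p =>
          match (l599FirstPos list2).get? p.1 with
          | some j => d.modify (p.2 + j) [] (fun l => l ++ [p.1])
          | none => d) PySem.Dict.empty)
          (PySem.List.pyRange 0 (PySem.List.len list1 + PySem.List.len list2 - 1) 1) := rfl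
  rw [e, l599_buckets_match]
  rfl

theorem l599Scan_eq_find? (bk : PySem.Dict Int (List String)) (l : List Int) :
    l599Scan bk l = ((l.find? (fun s => bk.contains s)).map (fun s => bk.getD s [])).getD [] := by
  induction l with
  | nil => rfl
  | cons s rest ih =>
    simp only [l599Scan, List.find?_cons]
    rcases h : bk.contains s with _ | _
    · simp [ih]
    · simp

theorem l599_find?_sorted (p : Int → Bool) (m : Int) (l : List Int)
    (hsort : l.Pairwise (· < ·)) (hm : m ∈ l) (hpm : p m = true)
    (hlb : ∀ s ∈ l, p s = true → m ≤ s) : l.find? p = some m := by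
  induction l with
  | nil => cases hm
  | cons x xs ih =>
    rcases List.pairwise_cons.mp hsort with ⟨hx, hxs⟩
    rcases List.mem_cons.mp hm with h | h
    · subst h
      simp [hpm]
    · have hxm : x < m := hx m h
      have hpx : p x = false := by
        rcases hpx : p x with _ | _
        · rfl
        · exact absurd (hlb x (by simp) hpx) (not_le.mpr hxm)
      simp only [List.find?_cons, hpx]
      exact ih hxs h (fun s hs hp => hlb s (List.mem_cons_of_mem _ hs) hp)

theorem l599_F_bounds (list1 list2 : List String) (v : String)
    (h1 : v ∈ list1) (h2 : v ∈ list2) :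
    0 ≤ l599F list1 list2 v ∧
      l599F list1 list2 v ≤ PySem.List.len list1 + PySem.List.len list2 - 2 := by
  obtain ⟨i1, hi1⟩ := Option.isSome_iff_exists.mp ((PySem.List.index?_isSome_iff list1 v).mpr h1)
  obtain ⟨i2, hi2⟩ := Option.isSome_iff_exists.mp ((PySem.List.index?_isSome_iff list2 v).mpr h2)
  obtain ⟨hb1, -, -⟩ := PySem.List.getElem_of_index?_eq_some hi1
  obtain ⟨hb2, -, -⟩ := PySem.List.getElem_of_index?_eq_some hi2
  unfold l599F
  rw [hi1, hi2, PySem.List.len_eq, PySem.List.len_eq]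
  simp only [Option.getD_some]
  constructor
  · positivity
  · omega

theorem l599_ports_eq (list1 list2 : List String) : l599 list1 list2 = l599_alt list1 list2 := by
  rw [l599_A_eq, l599_B_eq, l599Scan_eq_find?]
  by_cases hC : l599C list1 list2 = []
  · have hfind : (PySem.List.pyRange 0 (PySem.List.len list1 + PySem.List.len list2 - 1) 1).find?
        (fun s => ((l599Cand list1 list2).foldl
          (fun d q => d.modify q.1 [] (fun l => l ++ [q.2])) PySem.Dict.empty).contains s) = none := by
      apply List.find?_eq_none.mpr
      intro s _
      rw [l599_buckets_contains, hC]
      simp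
    rw [hfind, hC]
    rfl
  · obtain ⟨v0, hv0⟩ := List.exists_mem_of_ne_nil _ hC
    have hv0' := (l599C_mem list1 list2 v0).mp hv0
    have hb0 := l599_F_bounds list1 list2 v0 hv0'.1 hv0'.2
    have ha0 : PySem.List.len (list1 ++ list2)
        = PySem.List.len list1 + PySem.List.len list2 := by
      rw [PySem.List.len_eq, PySem.List.len_eq, PySem.List.len_eq]
      push_cast [List.length_append]; ring
    have hMle : l599M list1 list2 ≤ l599F list1 list2 v0 :=
      l599_minfold_le_mem _ _ _ _ hv0
    have hMne : l599M list1 list2 ≠ PySem.List.len (list1 ++ list2) := by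
      rw [ha0]; omega
    obtain ⟨vs, hvsC, hvsM⟩ := (l599_minfold_cases (l599F list1 list2) (l599C list1 list2)
      (PySem.List.len (list1 ++ list2))).resolve_left hMne
    have hvsM' : l599M list1 list2 = l599F list1 list2 vs := hvsM
    have hvs' := (l599C_mem list1 list2 vs).mp hvsC
    have hbs := l599_F_bounds list1 list2 vs hvs'.1 hvs'.2
    have hfind : (PySem.List.pyRange 0 (PySem.List.len list1 + PySem.List.len list2 - 1) 1).find?
        (fun s => ((l599Cand list1 list2).foldl
          (fun d q => d.modify q.1 [] (fun l => l ++ [q.2])) PySem.Dict.empty).contains s)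
        = some (l599M list1 list2) := by
      apply l599_find?_sorted
      · exact PySem.List.pairwise_lt_pyRange_one 0 _
      · exact PySem.List.mem_pyRange_one.mpr ⟨by omega, by omega⟩
      · rw [l599_buckets_contains]
        exact decide_eq_true ⟨vs, hvsC, hvsM.symm⟩
      · intro s _ hs
        rw [l599_buckets_contains] at hs
        obtain ⟨v, hvC, hvF⟩ := of_decide_eq_true hs
        rw [← hvF]
        exact l599_minfold_le_mem _ _ _ _ hvC
    rw [hfind]
    simp only [Option.map_some, Option.getD_some]
    rw [l599_buckets_getD]

-- ===== VERDICT (by name: the statement is the Claim_ definition above) =====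
theorem l599_spec : Claim_equal_l599 := by
  intro list1 list2 _dom _pre
  unfold Spec_l599
  exact l599_ports_eq list1 list2
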